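-- pv_equiv track=rewrite | github.com/Ohtears/KingPolynomial | main.py | simplify_generating_function
-- ===== SOURCE A (Python) =====
-- def simplify_generating_function(generating_function):
--     term_counts = {}
--     for term in generating_function:
--         if term in term_counts:
--             term_counts[term] += 1
--         else:
--             term_counts[term] = 1
--
--     simplified_terms = []
--     for term, count in term_counts.items():
--         if count == 1:
--             simplified_terms.append(term)
--         else:
--             simplified_terms.append(f"{count}{term}")
--
--     return " + ".join(simplified_terms)
-- ===== SOURCE B (Python) =====
-- def simplify_generating_function(generating_function):
--     ts = list(generating_function)
--     parts = []
--     while ts: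
--         head = ts[0]
--         c = ts.count(head)
--         parts.append(head if c == 1 else f"{c}{head}")
--         ts = [t for t in ts[1:] if t != head]
--     return " + ".join(parts)
-- ===== Notes on version B (the rewrite author's own statement) =====
-- stated objective: alternative
-- what changed: Replaces A's one-pass frequency-dict build with an iterative extract-and-filter partition: repeatedly take the first remaining term, count its occurrences in the remaining list, emit its piece, and filter all its copies out before continuing.
import Mathlib
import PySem

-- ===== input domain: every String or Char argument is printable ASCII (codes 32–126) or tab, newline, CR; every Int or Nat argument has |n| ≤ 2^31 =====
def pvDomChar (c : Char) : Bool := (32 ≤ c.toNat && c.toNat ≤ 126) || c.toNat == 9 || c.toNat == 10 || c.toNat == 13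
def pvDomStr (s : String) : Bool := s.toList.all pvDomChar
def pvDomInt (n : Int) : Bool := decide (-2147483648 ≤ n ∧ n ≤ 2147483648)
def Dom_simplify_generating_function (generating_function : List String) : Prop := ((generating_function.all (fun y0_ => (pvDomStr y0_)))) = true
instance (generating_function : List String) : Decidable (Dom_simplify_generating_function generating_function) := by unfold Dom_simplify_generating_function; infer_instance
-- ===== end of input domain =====

-- ===== PORT A =====
-- B uses an iterative extract-and-filter partition instead of A's frequency dict (objective: alternative).
def simplify_generating_function (generating_function : List String) : String :=
  let term_counts : PySem.Dict String Int :=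
    generating_function.foldl (fun d term => d.insert term (d.getD term 0 + 1)) PySem.Dict.empty
  let simplified_terms : List String :=
    term_counts.items.foldl (fun acc tc =>
      if tc.2 == 1 then acc ++ [tc.1] else acc ++ [PySem.Int.toStr tc.2 ++ tc.1]) []
  PySem.Str.join " + " simplified_terms

-- ===== PORT B =====
-- the while loop of Source B: take the first remaining term, count its occurrences,
-- emit its piece, filter all its copies out of the remainder, repeat
def pvPartLoop : List String → List String → List String
  | [], parts => parts
  | head :: tl, parts =>
    let c : Int := (PySem.List.count (head :: tl) head : Int)
    pvPartLoop (tl.filter (fun t => !(t == head)))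
      (parts ++ [if c == 1 then head else PySem.Int.toStr c ++ head])
termination_by ts _ => ts.length
decreasing_by
  simp only [List.length_unattach, List.length_cons, Nat.lt_succ_iff]
  exact le_trans (List.length_filter_le _ _) (by simp)

def simplify_generating_function_alt (generating_function : List String) : String :=
  PySem.Str.join " + " (pvPartLoop generating_function [])

-- ===== PRECONDITION & SPEC =====
def Spec_simplify_generating_function (generating_function : List String) (out : String) : Prop := out = simplify_generating_function_alt generating_function
instance (generating_function : List String) (out : String) : Decidable (Spec_simplify_generating_function generating_function out) := by unfold Spec_simplify_generating_function; infer_instance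

-- ===== CLAIM (what is proved, stated in full; the proofs are below) =====
def Claim_equal_simplify_generating_function : Prop := ∀ (generating_function : List String), Dom_simplify_generating_function generating_function → Spec_simplify_generating_function generating_function (simplify_generating_function generating_function)

-- ===== LEMMAS AND PROOFS =====
lemma fold_pairs (l : List (String × Int)) (acc : List String) :
    l.foldl (fun acc tc =>
      if tc.2 == 1 then acc ++ [tc.1] else acc ++ [PySem.Int.toStr tc.2 ++ tc.1]) acc
    = acc ++ l.map (fun tc => if tc.2 == 1 then tc.1 else PySem.Int.toStr tc.2 ++ tc.1) := by
  induction l generalizing acc with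
  | nil => simp
  | cons x xs ih =>
    simp only [List.foldl_cons, List.map_cons]
    split_ifs <;> rw [ih] <;> simp

lemma foldl_add_skip (h : String) (xs acc : List String) (hmem : h ∈ acc) :
    List.foldl PySem.Set.add acc xs
      = List.foldl PySem.Set.add acc (xs.filter (fun t => !(t == h))) := by
  induction xs generalizing acc with
  | nil => rfl
  | cons x xs ih =>
    by_cases hx : x = h
    · subst hx
      have hacc : PySem.Set.add acc x = acc := by
        simp [PySem.Set.add, hmem]
      have hf : (x :: xs).filter (fun t => !(t == x)) = xs.filter (fun t => !(t == x)) := by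
        simp
      rw [hf, List.foldl_cons, hacc]
      exact ih acc hmem
    · have hxb : (x == h) = false := by simp [hx]
      have hf : (x :: xs).filter (fun t => !(t == h)) = x :: xs.filter (fun t => !(t == h)) := by
        simp [hxb]
      rw [hf, List.foldl_cons, List.foldl_cons]
      apply ih
      simp [PySem.Set.add]
      split <;> simp [hmem]

lemma foldl_add_cons (h : String) (s xs : List String)
    (hx : ∀ x ∈ xs, (x == h) = false) :
    List.foldl PySem.Set.add (h :: s) xs = h :: List.foldl PySem.Set.add s xs := by
  induction xs generalizing s with
  | nil => rfl
  | cons x xs ih =>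
    have hxh : x ≠ h := by simpa using hx x (by simp)
    have hstep : PySem.Set.add (h :: s) x = h :: PySem.Set.add s x := by
      by_cases hxs : x ∈ s <;> simp [PySem.Set.add, hxh, hxs]
    rw [List.foldl_cons, hstep, List.foldl_cons]
    exact ih _ (fun y hy => hx y (by simp [hy]))

lemma dedup_cons_filter (h : String) (tl : List String) :
    PySem.List.dedup (h :: tl)
      = h :: PySem.List.dedup (tl.filter (fun t => !(t == h))) := by
  have e1 : PySem.List.dedup (h :: tl) = List.foldl PySem.Set.add [h] tl := by
    simp [PySem.List.dedup, PySem.Set.ofList, PySem.Set.add, PySem.Set.empty]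
  rw [e1, foldl_add_skip h tl [h] (by simp),
    foldl_add_cons h [] _ (fun x hxm => by
      have := List.of_mem_filter hxm
      simpa using this)]
  rfl

lemma pvPartLoop_eq (ts parts : List String) :
    pvPartLoop ts parts
      = parts ++ (PySem.List.dedup ts).map
          (fun t => if ((List.count t ts : Int)) == 1 then t
                    else PySem.Int.toStr (List.count t ts : Int) ++ t) := by
  induction hn : ts.length using Nat.strong_induction_on generalizing ts parts with
  | _ n ih =>
    match ts with
    | [] =>
      simp [pvPartLoop, PySem.List.dedup, PySem.Set.ofList, PySem.Set.empty]
    | head :: tl =>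
      rw [pvPartLoop.eq_2]
      have hlt : (tl.filter (fun t => !(t == head))).length < n := by
        subst hn
        exact Nat.lt_succ_of_le (List.length_filter_le _ tl)
      rw [ih _ hlt _ _ rfl, dedup_cons_filter]
      simp only [List.map_cons, List.append_assoc, List.singleton_append]
      congr 2
      apply List.map_congr_left
      intro a ht
      have htf : a ∈ tl.filter (fun t => !(t == head)) := by
        simpa only [PySem.List.dedup_eq_ofList, PySem.Set.mem_ofList] using ht
      have hab : (a == head) = false := by
        have := List.of_mem_filter htf
        simpa using this
      have hane : a ≠ head := beq_eq_false_iff_ne.mp hab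
      have hne' : (head == a) = false := beq_eq_false_iff_ne.mpr (fun h => hane h.symm)
      have hab : (a == head) = false := beq_eq_false_iff_ne.mpr hane
      have hcount : List.count a (tl.filter (fun t => !(t == head))) = List.count a tl :=
        List.count_filter (by simpa using hab)
      rw [hcount]
      simp [List.count_cons, hne']

-- ===== VERDICT (by name: the statement is the Claim_ definition above) =====
theorem simplify_generating_function_spec : Claim_equal_simplify_generating_function := by
  intro gf _
  show _ = _
  rw [simplify_generating_function, simplify_generating_function_alt, pvPartLoop_eq]
  simp only [PySem.Dict.foldl_insert_getD_add_one_eq_counter, PySem.Dict.items_counter,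
    fold_pairs, List.map_map, Function.comp_def, List.nil_append, PySem.List.dedup_eq_ofList]
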